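-- pv_equiv track=rewrite | github.com/suraj7289/NLP-WSD-Hyperlex | Hyperlex_WSD_Code.py | get_collocation_first_neighbour
-- ===== SOURCE A (Python) =====
-- def get_collocation_first_neighbour(tokens,tags,targetword):
--     collocation_list = []
--     collocation_tag_list = []
--     #find direct neighbours
--     for i in range(len(tokens)):
--         start = max((i-3),0)
--         end = min(i+4,len(tokens))
--         if tokens[i] == targetword:
--             collocation_list.extend(tokens[start:end])
--             collocation_tag_list.extend(tags[start:end])
--     collocation_list = remove_tag_stopwords(collocation_list,collocation_tag_list)
--
--     return collocation_list
--
-- def remove_tag_stopwords(collocation_list,collocation_tag_list):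
--     tags_to_process = ['NNS','NN','JJ']
--     words_to_process = [collocation_list[i] for i in range(len(collocation_tag_list)) if collocation_tag_list[i] in tags_to_process]
--     return words_to_process
-- ===== SOURCE B (Python) =====
-- def get_collocation_first_neighbour(tokens, tags, targetword):
--     # Precompute an ordered index of noun/adjective positions once, then for each
--     # target occurrence emit the contiguous run of that index inside the +/-3 window,
--     # advancing a monotone two-pointer instead of rescanning tags per window.
--     good = [(j, w) for j, (w, tg) in enumerate(zip(tokens, tags)) if tg in ('NNS', 'NN', 'JJ')]
--     out = []
--     lo = 0
--     m = len(good)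
--     for i in range(len(tokens)):
--         if tokens[i] == targetword:
--             while lo < m and good[lo][0] < i - 3:
--                 lo += 1
--             k = lo
--             while k < m and good[k][0] <= i + 3:
--                 out.append(good[k][1])
--                 k += 1
--     return out
-- ===== Notes on version B (the rewrite author's own statement) =====
-- stated objective: alternative
-- what changed: Instead of A's two phases (concatenate token and tag windows into two parallel lists, then filter them positionally), B precomputes once an ordered index of noun/adjective (position, word) pairs and, for each target occurrence, emits the contiguous run of that index inside the +/-3 window found with a monotone two-pointer, so tags are inspected once in total rather than once per window element.
-- outside the precondition, e.g. on get_collocation_first_neighbour(['a', 'x', 'a'], ['NN'], 'a'): A returns ['a', 'x'], B returns ['a', 'a']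
import Mathlib
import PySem

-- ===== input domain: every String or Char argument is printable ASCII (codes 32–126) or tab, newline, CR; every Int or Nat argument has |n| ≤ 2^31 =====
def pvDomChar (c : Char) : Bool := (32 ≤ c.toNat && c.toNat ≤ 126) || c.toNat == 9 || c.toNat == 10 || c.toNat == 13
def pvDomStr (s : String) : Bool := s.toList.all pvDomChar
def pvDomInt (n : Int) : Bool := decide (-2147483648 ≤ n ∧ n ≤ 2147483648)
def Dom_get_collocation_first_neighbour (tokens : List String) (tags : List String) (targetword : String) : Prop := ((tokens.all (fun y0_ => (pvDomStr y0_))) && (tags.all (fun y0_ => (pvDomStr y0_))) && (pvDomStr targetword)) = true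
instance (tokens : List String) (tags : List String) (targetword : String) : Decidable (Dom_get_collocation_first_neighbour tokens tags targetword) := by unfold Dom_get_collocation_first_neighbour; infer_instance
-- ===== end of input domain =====

-- B replaces A's two-phase collect-then-filter with a precomputed ordered index of
-- noun/adjective positions scanned by a monotone two-pointer; objective: alternative.


-- ===== PORT A =====
-- indexing collocation_list[i] via pyGetD is exact here: at A's sole call site
-- len(collocation_tag_list) ≤ len(collocation_list), so the index is always in range
def remove_tag_stopwords (collocation_list : List String) (collocation_tag_list : List String) : List String :=
  (PySem.List.pyRange 0 collocation_tag_list.length 1).foldl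
    (fun acc i =>
      if PySem.List.pyGetD collocation_tag_list i "" ∈ (["NNS", "NN", "JJ"] : List String) then
        acc ++ [PySem.List.pyGetD collocation_list i ""]
      else acc) []

def get_collocation_first_neighbour (tokens : List String) (tags : List String) (targetword : String) : List String :=
  let p :=
    (PySem.List.pyRange 0 tokens.length 1).foldl
      (fun (st : List String × List String) i =>
        if PySem.List.pyGetD tokens i "" = targetword then
          (st.1 ++ PySem.List.slice tokens (some (max (i - 3) 0)) (some (min (i + 4) (tokens.length : Int))),
           st.2 ++ PySem.List.slice tags (some (max (i - 3) 0)) (some (min (i + 4) (tokens.length : Int))))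
        else st) ([], [])
  remove_tag_stopwords p.1 p.2

-- ===== PORT B =====
-- `while lo < m and good[lo][0] < i - 3: lo += 1`   (in-range index, getD is exact)
def pvAdvance (good : List (Int × String)) (b : Int) (lo : Nat) : Nat :=
  if h : lo < good.length then
    if (good.getD lo (0, "")).1 < b then pvAdvance good b (lo + 1) else lo
  else lo
termination_by good.length - lo

-- `while k < m and good[k][0] <= i + 3: out.append(good[k][1]); k += 1`
def pvCollect (good : List (Int × String)) (b : Int) (k : Nat) (out : List String) : List String :=
  if h : k < good.length then
    if (good.getD k (0, "")).1 ≤ b then pvCollect good b (k + 1) (out ++ [(good.getD k (0, "")).2]) else out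
  else out
termination_by good.length - k

def get_collocation_first_neighbour_alt (tokens : List String) (tags : List String) (targetword : String) : List String :=
  let good := (PySem.List.enumerate (tokens.zip tags) 0).filterMap
    (fun p => if p.2.2 ∈ (["NNS", "NN", "JJ"] : List String) then some (p.1, p.2.1) else none)
  ((PySem.List.pyRange 0 tokens.length 1).foldl
    (fun (st : Nat × List String) i =>
      if PySem.List.pyGetD tokens i "" = targetword then
        let lo := pvAdvance good (i - 3) st.1
        (lo, pvCollect good (i + 3) lo st.2)
      else st) (0, [])).2

-- ===== PRECONDITION & SPEC =====
-- Pre_ excludes inputs where some NON-FINAL targetword occurrence has a window extending past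
-- len(tags): only there do A's two concatenated parallel lists desynchronize, so later windows are
-- paired with the wrong tags — a corner (tokens/tags of mismatched length) whose word–tag pairing
-- no caller specifies; B pairs each window token with its own tag.
def Pre_get_collocation_first_neighbour (tokens : List String) (tags : List String) (targetword : String) : Prop :=
  ∀ p ∈ tokens.zipIdx, p.1 = targetword →
    (min (p.2 + 4) tokens.length ≤ tags.length ∨
      ∀ q ∈ tokens.zipIdx, q.1 = targetword → q.2 ≤ p.2)
instance (tokens : List String) (tags : List String) (targetword : String) : Decidable (Pre_get_collocation_first_neighbour tokens tags targetword) := by unfold Pre_get_collocation_first_neighbour; infer_instance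

def pvWitness_get_collocation_first_neighbour : List String × List String × String :=
  (["the", "big", "dog", "ran"], ["DT", "JJ", "NN", "VBD"], "dog")

def Spec_get_collocation_first_neighbour (tokens : List String) (tags : List String) (targetword : String) (out : List String) : Prop := out = get_collocation_first_neighbour_alt tokens tags targetword
instance (tokens : List String) (tags : List String) (targetword : String) (out : List String) : Decidable (Spec_get_collocation_first_neighbour tokens tags targetword out) := by unfold Spec_get_collocation_first_neighbour; infer_instance

-- ===== CLAIM (what is proved, stated in full; the proofs are below) =====
def Claim_equal_get_collocation_first_neighbour : Prop := ∀ (tokens : List String) (tags : List String) (targetword : String), Dom_get_collocation_first_neighbour tokens tags targetword → Pre_get_collocation_first_neighbour tokens tags targetword → Spec_get_collocation_first_neighbour tokens tags targetword (get_collocation_first_neighbour tokens tags targetword)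

-- ===== LEMMAS AND PROOFS =====

-- reference function: walk two lists in lockstep, keep words whose tag qualifies
def fz : List String → List String → List String
  | w :: ws, t :: ts => if t ∈ (["NNS", "NN", "JJ"] : List String) then w :: fz ws ts else fz ws ts
  | _, _ => []

-- reference for B's index: qualifying (position, word) pairs, positions starting at j
def goodFrom : Int → List String → List String → List (Int × String)
  | j, w :: ws, t :: ts =>
      if t ∈ (["NNS", "NN", "JJ"] : List String) then (j, w) :: goodFrom (j + 1) ws ts
      else goodFrom (j + 1) ws ts
  | _, _, _ => []

theorem fz_nil_left (ts : List String) : fz [] ts = [] := by cases ts <;> rfl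

theorem fz_append {a b : List String} (c d : List String) (h : a.length = b.length) :
    fz (a ++ c) (b ++ d) = fz a b ++ fz c d := by
  induction a generalizing b with
  | nil => cases b with
    | nil => simp [fz_nil_left]
    | cons _ _ => simp only [List.length_nil, List.length_cons] at h; omega
  | cons w ws ih =>
    cases b with
    | nil => simp at h
    | cons t ts =>
      simp only [List.length_cons, Nat.add_right_cancel_iff] at h
      simp only [List.cons_append, fz, ih (b := ts) h]
      split <;> simp

-- the index-driven filter loop over two lists equals fz of the corresponding segments
theorem fold_idx (X Y : List String) (s e : Nat) (hse : s ≤ e)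
    (hX : e ≤ X.length) (hY : e ≤ Y.length) (acc : List String) :
    List.foldl
      (fun acc2 j =>
        if PySem.List.pyGetD Y j "" ∈ (["NNS", "NN", "JJ"] : List String) then
          acc2 ++ [PySem.List.pyGetD X j ""]
        else acc2) acc (PySem.List.pyRange (s : Int) (e : Int) 1)
    = acc ++ fz ((X.drop s).take (e - s)) ((Y.drop s).take (e - s)) := by
  induction hn : e - s generalizing s acc with
  | zero =>
    have hes : (e : Int) ≤ (s : Int) := by exact_mod_cast Nat.le_of_sub_eq_zero hn
    have : PySem.List.pyRange (s : Int) (e : Int) 1 = [] := by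
      simp [PySem.List.pyRange_one]
      omega
    simp [this, fz_nil_left]
  | succ k ih =>
    have hslt : s < e := by omega
    have hXs : s < X.length := by omega
    have hYs : s < Y.length := by omega
    rw [PySem.List.pyRange_one_cons (by exact_mod_cast hslt)]
    simp only [List.foldl_cons]
    have hcast : ((s : Int) + 1) = ((s + 1 : Nat) : Int) := by push_cast; ring
    rw [hcast, ih (s + 1) (by omega) _ (by omega)]
    rw [List.drop_eq_getElem_cons hXs, List.drop_eq_getElem_cons hYs]
    rw [List.take_succ_cons, List.take_succ_cons]
    simp only [PySem.List.pyGetD_natCast]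
    rw [List.getD_eq_getElem _ _ hXs, List.getD_eq_getElem _ _ hYs]
    simp only [fz]
    split <;> simp

-- fz never looks past the shorter list, so over-long words can be truncated
theorem fz_take (ts : List String) : ∀ ws : List String, fz (ws.take ts.length) ts = fz ws ts := by
  induction ts with
  | nil => intro ws; simp [fz_nil_left]; cases ws <;> rfl
  | cons t ts ih =>
    intro ws
    cases ws with
    | nil => rfl
    | cons w ws =>
      simp only [List.length_cons, List.take_succ_cons, fz, ih ws]

-- both loops run over the TAG list's indices, so only len(tags) ≤ len(words) is needed
theorem remove_eq_fz (cl ctl : List String) (h : ctl.length ≤ cl.length) :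
    remove_tag_stopwords cl ctl = fz cl ctl := by
  have h0 := fold_idx cl ctl 0 ctl.length (Nat.zero_le _) h le_rfl []
  simp only [List.drop_zero, Nat.sub_zero, List.take_length, List.nil_append] at h0
  rw [fz_take] at h0
  simpa [remove_tag_stopwords] using h0

-- a fold whose step fixes the accumulator on every member is the identity
theorem pv_foldl_id {α β : Type} (L : List β) (f : α → β → α) (init : α)
    (h : ∀ acc, ∀ x ∈ L, f acc x = acc) : L.foldl f init = init := by
  induction L generalizing init with
  | nil => rfl
  | cons x L ih =>
    rw [List.foldl_cons, h init x (List.mem_cons_self ..)]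
    exact ih init (fun acc y hy => h acc y (List.mem_cons_of_mem _ hy))

-- B's comprehension builds exactly goodFrom
theorem good_eq_goodFrom (ws ts : List String) (j : Int) :
    (PySem.List.enumerate (ws.zip ts) j).filterMap
      (fun p => if p.2.2 ∈ (["NNS", "NN", "JJ"] : List String) then some (p.1, p.2.1) else none)
    = goodFrom j ws ts := by
  induction ws generalizing ts j with
  | nil => cases ts <;> rfl
  | cons w ws ih =>
    cases ts with
    | nil => rfl
    | cons t ts =>
      simp only [List.zip_cons_cons, PySem.List.enumerate_cons, List.filterMap_cons, goodFrom]
      by_cases ht : t ∈ (["NNS", "NN", "JJ"] : List String)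
      · rw [if_pos ht, if_pos ht]
        exact congrArg _ (ih ts (j + 1))
      · rw [if_neg ht, if_neg ht]
        exact ih ts (j + 1)

theorem goodFrom_map_snd (ws ts : List String) (j : Int) :
    (goodFrom j ws ts).map Prod.snd = fz ws ts := by
  induction ws generalizing ts j with
  | nil => cases ts <;> rfl
  | cons w ws ih =>
    cases ts with
    | nil => rfl
    | cons t ts =>
      simp only [goodFrom, fz]
      split <;> simp [ih]

theorem goodFrom_bounds (ws : List String) : ∀ (ts : List String) (j : Int),
    ∀ p ∈ goodFrom j ws ts, j ≤ p.1 ∧ p.1 < j + (min ws.length ts.length : Nat) := by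
  induction ws with
  | nil => intro ts j p hp; cases ts <;> simp [goodFrom] at hp
  | cons w ws ih =>
    intro ts j p hp
    cases ts with
    | nil => simp [goodFrom] at hp
    | cons t ts =>
      simp only [goodFrom] at hp
      simp only [List.length_cons]
      by_cases ht : t ∈ (["NNS", "NN", "JJ"] : List String)
      · rw [if_pos ht] at hp
        rcases List.mem_cons.1 hp with h | h
        · subst h; dsimp only; push_cast; omega
        · have := ih ts (j + 1) p h; push_cast at this ⊢; omega
      · rw [if_neg ht] at hp
        have := ih ts (j + 1) p hp; push_cast at this ⊢; omega

theorem goodFrom_split (d : Nat) (ws ts : List String) (j : Int) :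
    goodFrom j ws ts
    = goodFrom j (ws.take d) (ts.take d) ++ goodFrom (j + (d : Nat)) (ws.drop d) (ts.drop d) := by
  induction d generalizing ws ts j with
  | zero => simp [goodFrom]
  | succ k ih =>
    cases ws with
    | nil => cases ts <;> simp [goodFrom]
    | cons w ws =>
      cases ts with
      | nil => simp [goodFrom]
      | cons t ts =>
        simp only [List.take_succ_cons, List.drop_succ_cons, goodFrom]
        have hj : j + ((k + 1 : Nat) : Int) = (j + 1) + (k : Nat) := by push_cast; ring
        rw [hj]
        split <;> simp [ih ws ts (j + 1)]

-- pvAdvance lands exactly at the boundary between the below-b prefix and the at-least-b rest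
theorem advance_eq (good P R : List (Int × String)) (b : Int) (lo : Nat)
    (hg : good = P ++ R) (hP : ∀ p ∈ P, p.1 < b) (hR : ∀ p ∈ R, b ≤ p.1)
    (hlen : lo ≤ good.length)
    (hlo : ∀ m, m < lo → (good.getD m (0, "")).1 < b) :
    pvAdvance good b lo = P.length := by
  induction hfuel : good.length - lo generalizing lo with
  | zero =>
    have hlo_len : lo = good.length := by omega
    have hR_nil : R = [] := by
      cases hR' : R with
      | nil => rfl
      | cons r rs =>
        exfalso
        have hget : good.getD P.length (0, "") = r := by
          rw [hg, hR']; simp [List.getD]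
        have hPlen : P.length < lo := by rw [hlo_len, hg, hR']; simp
        have h1 := hlo P.length hPlen
        rw [hget] at h1
        have h2 := hR r (by simp [hR'])
        omega
    rw [pvAdvance]
    simp [hlo_len, hg, hR_nil]
  | succ k ih =>
    have hlt : lo < good.length := by omega
    rw [pvAdvance, dif_pos hlt]
    by_cases hb : (good.getD lo (0, "")).1 < b
    · rw [if_pos hb]
      exact ih (lo + 1) (by omega)
        (fun m hm => by
          rcases Nat.lt_succ_iff_lt_or_eq.1 hm with h | h
          · exact hlo m h
          · subst h; exact hb) (by omega)
    · rw [if_neg hb]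
      have hloP : P.length ≤ lo := by
        by_contra hcon
        push_neg at hcon
        have hget : good.getD lo (0, "") = P.getD lo (0, "") := by
          rw [hg]; exact List.getD_append P R _ lo hcon
        have hmem : P.getD lo (0, "") ∈ P := by
          rw [List.getD_eq_getElem _ _ hcon]; exact List.getElem_mem _
        have := hP _ hmem
        rw [hget] at hb
        omega
      have hPlo : lo ≤ P.length := by
        rcases hR' : R with _ | ⟨r, rs⟩
        · have : good.length = P.length := by rw [hg, hR']; simp
          omega
        · by_contra hcon
          push_neg at hcon
          have hget : good.getD P.length (0, "") = r := by
            rw [hg, hR']; simp [List.getD]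
          have h1 := hlo P.length hcon
          rw [hget] at h1
          have h2 := hR r (by simp [hR'])
          omega
      omega

-- pvCollect, started at the prefix boundary, appends exactly the middle segment's words
theorem collect_eq (good P M S : List (Int × String)) (b : Int) (out : List String)
    (hg : good = P ++ M ++ S) (hM : ∀ p ∈ M, p.1 ≤ b) (hS : ∀ p ∈ S, b < p.1) :
    pvCollect good b P.length out = out ++ M.map Prod.snd := by
  induction M generalizing P out with
  | nil =>
    rw [pvCollect]
    rcases hS' : S with _ | ⟨t, ts⟩
    · have : good.length = P.length := by rw [hg, hS']; simp
      rw [dif_neg (by omega)]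
      simp
    · have hpos : P.length < good.length := by rw [hg, hS']; simp
      rw [dif_pos hpos]
      have hget : good.getD P.length (0, "") = t := by
        have hg2 : good = P ++ t :: ts := by simp [hg, hS']
        rw [hg2]; simp [List.getD]
      have htb := hS t (by simp [hS'])
      rw [hget, if_neg (by omega)]
      simp
  | cons p M ih =>
    have hpos : P.length < good.length := by rw [hg]; simp
    rw [pvCollect, dif_pos hpos]
    have hget : good.getD P.length (0, "") = p := by
      have hg2 : good = P ++ p :: (M ++ S) := by simp [hg]
      rw [hg2]; simp [List.getD]
    rw [hget, if_pos (hM p (by simp))]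
    have hg' : good = (P ++ [p]) ++ M ++ S := by simp [hg]
    have h2 := ih (P ++ [p]) (out ++ [p.2]) hg' (fun q hq => hM q (by simp [hq]))
    simp only [List.length_append, List.length_cons, List.length_nil] at h2
    rw [h2]
    simp

-- outer loop: A's two accumulated lists, filtered with fz, track B's two-pointer accumulator
theorem outer (tokens tags : List String) (targetword : String) (G : List (Int × String))
    (hG : G = goodFrom 0 tokens tags) (L : List Int)
    (hL : ∀ i ∈ L, (0 ≤ i ∧ i < (tokens.length : Int)) ∧
      (PySem.List.pyGetD tokens i "" = targetword →
        (min (i + 4) (tokens.length : Int) ≤ (tags.length : Int) ∨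
          ∀ i' ∈ L, PySem.List.pyGetD tokens i' "" = targetword → i' ≤ i)))
    (hpw : L.Pairwise (· < ·)) :
    ∀ (cl ctl : List String) (lo : Nat) (out : List String), ctl.length = cl.length → out = fz cl ctl →
      lo ≤ G.length → (∀ m, m < lo → ∀ i ∈ L, (G.getD m (0, "")).1 < i - 3) →
      (L.foldl
        (fun (st : List String × List String) i =>
          if PySem.List.pyGetD tokens i "" = targetword then
            (st.1 ++ PySem.List.slice tokens (some (max (i - 3) 0)) (some (min (i + 4) (tokens.length : Int))),
             st.2 ++ PySem.List.slice tags (some (max (i - 3) 0)) (some (min (i + 4) (tokens.length : Int))))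
          else st) (cl, ctl)).2.length
      ≤ (L.foldl
          (fun (st : List String × List String) i =>
            if PySem.List.pyGetD tokens i "" = targetword then
              (st.1 ++ PySem.List.slice tokens (some (max (i - 3) 0)) (some (min (i + 4) (tokens.length : Int))),
               st.2 ++ PySem.List.slice tags (some (max (i - 3) 0)) (some (min (i + 4) (tokens.length : Int))))
            else st) (cl, ctl)).1.length
      ∧ (L.foldl
          (fun (st : Nat × List String) i =>
            if PySem.List.pyGetD tokens i "" = targetword then
              let lo' := pvAdvance G (i - 3) st.1
              (lo', pvCollect G (i + 3) lo' st.2)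
            else st) (lo, out)).2
        = fz (L.foldl
            (fun (st : List String × List String) i =>
              if PySem.List.pyGetD tokens i "" = targetword then
                (st.1 ++ PySem.List.slice tokens (some (max (i - 3) 0)) (some (min (i + 4) (tokens.length : Int))),
                 st.2 ++ PySem.List.slice tags (some (max (i - 3) 0)) (some (min (i + 4) (tokens.length : Int))))
              else st) (cl, ctl)).1
            (L.foldl
              (fun (st : List String × List String) i =>
                if PySem.List.pyGetD tokens i "" = targetword then
                  (st.1 ++ PySem.List.slice tokens (some (max (i - 3) 0)) (some (min (i + 4) (tokens.length : Int))),
                   st.2 ++ PySem.List.slice tags (some (max (i - 3) 0)) (some (min (i + 4) (tokens.length : Int))))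
                else st) (cl, ctl)).2 := by
  induction L with
  | nil =>
    intro cl ctl lo out h1 h2 _ _
    exact ⟨le_of_eq h1, by simpa using h2⟩
  | cons i L ih =>
    intro cl ctl lo out h1 h2 hloG hinv
    obtain ⟨⟨hi0, hin⟩, htag⟩ := hL i (List.mem_cons_self ..)
    have hL' : ∀ j ∈ L, (0 ≤ j ∧ j < (tokens.length : Int)) ∧
        (PySem.List.pyGetD tokens j "" = targetword →
          (min (j + 4) (tokens.length : Int) ≤ (tags.length : Int) ∨
            ∀ i' ∈ L, PySem.List.pyGetD tokens i' "" = targetword → i' ≤ j)) := by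
      intro j hj
      obtain ⟨hb', htag'⟩ := hL j (List.mem_cons_of_mem _ hj)
      exact ⟨hb', fun hocc => (htag' hocc).imp id
        (fun hall i' hi' => hall i' (List.mem_cons_of_mem _ hi'))⟩
    have hmono : ∀ i' ∈ L, i < i' := (List.pairwise_cons.1 hpw).1
    have hpw' : L.Pairwise (· < ·) := (List.pairwise_cons.1 hpw).2
    simp only [List.foldl_cons]
    by_cases hc : PySem.List.pyGetD tokens i "" = targetword
    · simp only [hc, if_true]
      set a : Int := max (i - 3) 0 with ha
      set e : Int := min (i + 4) (tokens.length : Int) with he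
      have ha0 : 0 ≤ a := le_max_right _ _
      have he0 : 0 ≤ e := by omega
      have hae : a ≤ e := by omega
      have heT : e.toNat ≤ tokens.length := by omega
      rw [PySem.List.slice_toNat tokens ha0 he0, PySem.List.slice_toNat tags ha0 he0]
      set winT := (tokens.drop a.toNat).take (e.toNat - a.toNat) with hwT
      set winG := (tags.drop a.toNat).take (e.toNat - a.toNat) with hwG
      set P := goodFrom 0 (tokens.take a.toNat) (tags.take a.toNat) with hPdef
      set M := goodFrom a winT winG with hMdef
      set S := goodFrom e (tokens.drop e.toNat) (tags.drop e.toNat) with hSdef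
      -- window lengths
      have hlT : winT.length = e.toNat - a.toNat := by
        rw [hwT, List.length_take, List.length_drop]; omega
      -- decompose the index G = P ++ (M ++ S)
      have hdec : G = P ++ (M ++ S) := by
        have e2 : ((a.toNat : Nat) : Int) = a := by omega
        have e3 : a + (((e.toNat - a.toNat : Nat)) : Int) = e := by omega
        have e4 : (tokens.drop a.toNat).drop (e.toNat - a.toNat) = tokens.drop e.toNat := by
          rw [List.drop_drop]; congr 1; omega
        have e5 : (tags.drop a.toNat).drop (e.toNat - a.toNat) = tags.drop e.toNat := by
          rw [List.drop_drop]; congr 1; omega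
        rw [hG, goodFrom_split a.toNat tokens tags 0, zero_add, e2,
          goodFrom_split (e.toNat - a.toNat) (tokens.drop a.toNat) (tags.drop a.toNat) a,
          e3, e4, e5]
      have hPb : ∀ p ∈ P, p.1 < i - 3 := by
        intro p hp
        have hb := goodFrom_bounds _ _ _ p hp
        rw [List.length_take, List.length_take] at hb
        omega
      have hMb : ∀ p ∈ M, a ≤ p.1 ∧ p.1 ≤ i + 3 := by
        intro p hp
        have hb := goodFrom_bounds _ _ _ p hp
        rw [hlT] at hb
        omega
      have hSb : ∀ p ∈ S, i + 3 < p.1 := by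
        intro p hp
        have hb := goodFrom_bounds _ _ _ p hp
        rw [List.length_drop, List.length_drop] at hb
        omega
      have hlo' : pvAdvance G (i - 3) lo = P.length := by
        refine advance_eq G P (M ++ S) (i - 3) lo hdec hPb ?_ hloG ?_
        · intro p hp
          rcases List.mem_append.1 hp with h | h
          · have := (hMb p h).1; omega
          · have := hSb p h; omega
        · intro m hm; exact hinv m hm i (List.mem_cons_self ..)
      have hcol : pvCollect G (i + 3) P.length out = out ++ M.map Prod.snd := by
        refine collect_eq G P M S (i + 3) out ?_ (fun p hp => (hMb p hp).2) hSb
        rw [hdec, List.append_assoc]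
      rw [hlo', hcol]
      have h2' : out ++ M.map Prod.snd = fz (cl ++ winT) (ctl ++ winG) := by
        rw [fz_append winT winG h1.symm, ← h2, hMdef, goodFrom_map_snd winT winG a]
      rcases htag hc with hfit | hlast
      · -- this window fits inside the tag list: lengths stay equal, recurse
        have heG : e.toNat ≤ tags.length := by omega
        have hlG : winG.length = e.toNat - a.toNat := by
          rw [hwG, List.length_take, List.length_drop]; omega
        have h1' : (ctl ++ winG).length = (cl ++ winT).length := by
          rw [List.length_append, List.length_append, h1, hlT, hlG]
        have hinv' : ∀ m, m < P.length → ∀ i' ∈ L, (G.getD m (0, "")).1 < i' - 3 := by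
          intro m hm i' hi'
          have hgm : G.getD m (0, "") = P.getD m (0, "") := by
            rw [hdec]; exact List.getD_append _ _ _ _ hm
          have hmem : P.getD m (0, "") ∈ P := by
            rw [List.getD_eq_getElem _ _ hm]; exact List.getElem_mem _
          have hlt := hPb _ hmem
          have hle := hmono i' hi'
          rw [hgm]; omega
        have hlen' : P.length ≤ G.length := by rw [hdec]; simp
        exact ih hL' hpw' (cl ++ winT) (ctl ++ winG) P.length (out ++ M.map Prod.snd) h1' h2' hlen' hinv'
      · -- i is the last occurrence: the remaining fold is the identity on both sides
        have hnone : ∀ i' ∈ L, ¬(PySem.List.pyGetD tokens i' "" = targetword) := by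
          intro i' hi' hocc
          have hle := hlast i' (List.mem_cons_of_mem _ hi') hocc
          have hlt := hmono i' hi'
          omega
        rw [pv_foldl_id L _ _ (fun acc x hx => by simp [hnone x hx]),
          pv_foldl_id L _ _ (fun acc x hx => by simp [hnone x hx])]
        refine ⟨?_, h2'⟩
        have hwg : winG.length ≤ e.toNat - a.toNat := by
          rw [hwG, List.length_take]; omega
        rw [List.length_append, List.length_append, h1, hlT]
        omega
    · simp only [hc, if_false]
      exact ih hL' hpw' cl ctl lo out h1 h2 hloG
        (fun m hm i' hi' => hinv m hm i' (List.mem_cons_of_mem _ hi'))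

-- ===== VERDICT (by name: the statement is the Claim_ definition above) =====
theorem get_collocation_first_neighbour_spec : Claim_equal_get_collocation_first_neighbour := by
  intro tokens tags targetword _ hpre
  unfold Spec_get_collocation_first_neighbour
  unfold get_collocation_first_neighbour get_collocation_first_neighbour_alt
  have hL : ∀ i ∈ PySem.List.pyRange 0 (tokens.length : Int) 1,
      (0 ≤ i ∧ i < (tokens.length : Int)) ∧
      (PySem.List.pyGetD tokens i "" = targetword →
        (min (i + 4) (tokens.length : Int) ≤ (tags.length : Int) ∨
          ∀ i' ∈ PySem.List.pyRange 0 (tokens.length : Int) 1,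
            PySem.List.pyGetD tokens i' "" = targetword → i' ≤ i)) := by
    intro i hi
    have hb := (PySem.List.mem_pyRange_one).1 hi
    refine ⟨⟨hb.1, hb.2⟩, fun hm => ?_⟩
    have hk : i = ((i.toNat : Nat) : Int) := by omega
    have hkn : i.toNat < tokens.length := by omega
    rw [hk, PySem.List.pyGetD_natCast, List.getD_eq_getElem _ _ hkn] at hm
    have hmem : (tokens[i.toNat], i.toNat) ∈ tokens.zipIdx :=
      List.mk_mem_zipIdx_iff_getElem?.mpr (List.getElem?_eq_getElem hkn)
    rcases hpre _ hmem hm with hfit | hlast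
    · left
      simp only [min_le_iff] at hfit ⊢
      omega
    · right
      intro i' hi' hm'
      have hb' := (PySem.List.mem_pyRange_one).1 hi'
      have hk' : i' = ((i'.toNat : Nat) : Int) := by omega
      have hkn' : i'.toNat < tokens.length := by omega
      rw [hk', PySem.List.pyGetD_natCast, List.getD_eq_getElem _ _ hkn'] at hm'
      have hmem' : (tokens[i'.toNat], i'.toNat) ∈ tokens.zipIdx :=
        List.mk_mem_zipIdx_iff_getElem?.mpr (List.getElem?_eq_getElem hkn')
      have := hlast _ hmem' hm'
      omega
  have hpw : (PySem.List.pyRange 0 (tokens.length : Int) 1).Pairwise (· < ·) :=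
    PySem.List.pairwise_lt_pyRange_one 0 (tokens.length : Int)
  have hout := outer tokens tags targetword (goodFrom 0 tokens tags) rfl
    (PySem.List.pyRange 0 (tokens.length : Int) 1) hL hpw [] [] 0 [] rfl rfl (Nat.zero_le _)
    (by intro m hm; exact absurd hm (by omega))
  obtain ⟨hlenP, hB⟩ := hout
  simp only [good_eq_goodFrom]
  rw [remove_eq_fz _ _ hlenP, ← hB]
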